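-- pv_equiv track=rewrite | github.com/sathvikr/ai-stuff | ai_sudoku_solver/sudoku_forwardlooking.py | get_neighbors_dictionary
-- ===== SOURCE A (Python) =====
-- from collections import defaultdict
--
-- def get_neighbors_dictionary(pseudo_puzzle, constraint_sets):
--     neighbors = defaultdict(set)
--
--     for index, cell in enumerate(pseudo_puzzle):
--         for constraint_set in constraint_sets:
--             for constrained_indices in constraint_set:
--                 if index in constrained_indices:
--                     neighbors[index] |= constrained_indices
--
--     return neighbors
-- ===== SOURCE B (Python) =====
-- def get_neighbors_dictionary(pseudo_puzzle, constraint_sets):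
--     acc = {}
--     for constraint_set in constraint_sets:
--         for group in constraint_set:
--             for m in group:
--                 if m in acc:
--                     acc[m] |= group
--                 else:
--                     acc[m] = set(group)
--     return {i: acc[i] for i in range(len(pseudo_puzzle)) if i in acc}
-- ===== Notes on version B (the rewrite author's own statement) =====
-- stated objective: faster
-- what changed: B makes one inverted pass over the constraint groups, unioning each group into each member's entry of a dict, then emits the in-range indices in order, instead of A's per-cell rescan of every group with a membership test.
import Mathlib
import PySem

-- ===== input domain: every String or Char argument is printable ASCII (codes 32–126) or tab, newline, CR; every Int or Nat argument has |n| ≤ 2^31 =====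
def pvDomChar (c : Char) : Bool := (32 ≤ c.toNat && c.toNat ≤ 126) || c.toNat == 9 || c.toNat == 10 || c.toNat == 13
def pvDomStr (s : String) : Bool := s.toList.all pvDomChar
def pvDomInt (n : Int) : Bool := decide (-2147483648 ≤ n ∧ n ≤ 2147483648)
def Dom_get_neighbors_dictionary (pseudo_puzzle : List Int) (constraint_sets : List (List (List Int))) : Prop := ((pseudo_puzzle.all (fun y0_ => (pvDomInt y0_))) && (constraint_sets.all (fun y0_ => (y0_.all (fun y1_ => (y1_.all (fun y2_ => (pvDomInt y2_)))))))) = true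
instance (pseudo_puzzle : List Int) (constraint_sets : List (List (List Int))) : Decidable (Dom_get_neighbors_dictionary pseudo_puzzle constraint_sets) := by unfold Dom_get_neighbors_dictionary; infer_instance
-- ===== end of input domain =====

-- B replaces A's per-cell rescan of every constraint group by one inverted pass over the groups
-- (union each group into each member's entry of a dict), then emits the in-range indices in order.
-- The innermost List Int models the Python set constrained_indices/group (distinct elements).

-- ===== PORT A =====
def get_neighbors_dictionary (pseudo_puzzle : List Int) (constraint_sets : List (List (List Int))) : List (Int × List Int) :=
  ((PySem.List.enumerate pseudo_puzzle 0).foldl (fun d ic =>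
      constraint_sets.foldl (fun d constraint_set =>
        constraint_set.foldl (fun (d : PySem.Dict Int (PySem.Set Int)) constrained_indices =>
          if ic.1 ∈ constrained_indices then
            d.modify ic.1 PySem.Set.empty (fun s => PySem.Set.union s constrained_indices)
          else d) d) d)
    PySem.Dict.empty).items

-- ===== PORT B =====
def get_neighbors_dictionary_alt (pseudo_puzzle : List Int) (constraint_sets : List (List (List Int))) : List (Int × List Int) :=
  let acc : PySem.Dict Int (PySem.Set Int) :=
    constraint_sets.foldl (fun acc constraint_set =>
      constraint_set.foldl (fun acc group =>
        group.foldl (fun (acc : PySem.Dict Int (PySem.Set Int)) m =>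
          if acc.contains m then
            acc.insert m (PySem.Set.union (acc.getD m PySem.Set.empty) group)
          else
            acc.insert m (PySem.Set.ofList group)) acc) acc) PySem.Dict.empty
  ((PySem.List.pyRange 0 (pseudo_puzzle.length : Int) 1).foldl
      (fun (out : PySem.Dict Int (PySem.Set Int)) i =>
        match acc.get? i with
        | some s => out.insert i s
        | none => out) PySem.Dict.empty).items

-- ===== PRECONDITION & SPEC =====
def Spec_get_neighbors_dictionary (pseudo_puzzle : List Int) (constraint_sets : List (List (List Int))) (out : List (Int × List Int)) : Prop := out = get_neighbors_dictionary_alt pseudo_puzzle constraint_sets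
instance (pseudo_puzzle : List Int) (constraint_sets : List (List (List Int))) (out : List (Int × List Int)) : Decidable (Spec_get_neighbors_dictionary pseudo_puzzle constraint_sets out) := by unfold Spec_get_neighbors_dictionary; infer_instance

-- ===== CLAIM (what is proved, stated in full; the proofs are below) =====
def Claim_equal_get_neighbors_dictionary : Prop := ∀ (pseudo_puzzle : List Int) (constraint_sets : List (List (List Int))), Dom_get_neighbors_dictionary pseudo_puzzle constraint_sets → Spec_get_neighbors_dictionary pseudo_puzzle constraint_sets (get_neighbors_dictionary pseudo_puzzle constraint_sets)

-- ===== LEMMAS AND PROOFS =====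

-- Both programs compute, for each index, the fold of set-unions over the groups containing it;
-- pvL n gs is the common items list both dicts end up with (gs = the flattened group list).
def pvHits (x : Int) (gs : List (List Int)) : Bool := gs.any (fun g => decide (x ∈ g))

def pvSfold (x : Int) (gs : List (List Int)) (s : PySem.Set Int) : PySem.Set Int :=
  gs.foldl (fun s g => if x ∈ g then PySem.Set.union s g else s) s

def pvL (n : Nat) (gs : List (List Int)) : List (Int × PySem.Set Int) :=
  (List.range n).filterMap (fun (k : Nat) =>
    if pvHits (k : Int) gs then some (((k : Int), pvSfold (k : Int) gs PySem.Set.empty) : Int × PySem.Set Int) else none)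

theorem pv_foldl_nest {α β : Type} (f : β → α → β) (cs : List (List α)) (d : β) :
    cs.foldl (fun d c => c.foldl f d) d = (cs.flatMap id).foldl f d := by
  induction cs generalizing d with
  | nil => rfl
  | cons c t ih => simp [List.foldl_append, ih]

theorem pv_sfold_no_hits (x : Int) (gs : List (List Int)) (s : PySem.Set Int)
    (h : pvHits x gs = false) : pvSfold x gs s = s := by
  induction gs generalizing s with
  | nil => rfl
  | cons g t ih =>
    simp only [pvHits, List.any_cons, Bool.or_eq_false_iff, decide_eq_false_iff_not] at h
    simpa [pvSfold, h.1] using ih s (by simp [pvHits, h.2])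

theorem pv_update_of_subset (t : List Int) : ∀ s : PySem.Set Int, (∀ y ∈ t, y ∈ s) →
    PySem.Set.update s t = s := by
  induction t with
  | nil => intro s _; rfl
  | cons y t ih =>
    intro s h
    rw [PySem.Set.update_cons, PySem.Set.add_of_mem (h y (List.mem_cons_self))]
    exact ih s (fun z hz => h z (List.mem_cons_of_mem _ hz))

theorem pv_union_absorb (s : PySem.Set Int) (g : List Int) :
    PySem.Set.union (PySem.Set.union s g) g = PySem.Set.union s g :=
  pv_update_of_subset g _ (fun y hy => by simp [PySem.Set.mem_union, hy])

-- B's per-member step, in the uniform insert form.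
theorem pv_mstep_eq (d : PySem.Dict Int (PySem.Set Int)) (m : Int) (g : List Int) :
    (if d.contains m then d.insert m (PySem.Set.union (d.getD m PySem.Set.empty) g)
     else d.insert m (PySem.Set.ofList g))
    = d.insert m (PySem.Set.union ((d.get? m).getD PySem.Set.empty) g) := by
  by_cases h : d.contains m = true
  · rw [if_pos h, PySem.Dict.getD_eq_get?_getD]
  · rw [if_neg h]
    rw [Bool.not_eq_true] at h
    rw [(PySem.Dict.get?_eq_none_iff_contains _ _).mpr h]
    rfl

-- B's loop over the members of one group: only the keys in the group change, each to the union.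
theorem pv_mfold_get? (g : List Int) (l : List Int) (d : PySem.Dict Int (PySem.Set Int)) (x : Int) :
    (l.foldl (fun (acc : PySem.Dict Int (PySem.Set Int)) m =>
        if acc.contains m then acc.insert m (PySem.Set.union (acc.getD m PySem.Set.empty) g)
        else acc.insert m (PySem.Set.ofList g)) d).get? x
    = if x ∈ l then some (PySem.Set.union ((d.get? x).getD PySem.Set.empty) g) else d.get? x := by
  induction l generalizing d with
  | nil => simp
  | cons m t ih =>
    rw [List.foldl_cons, pv_mstep_eq, ih]
    by_cases hxm : x = m
    · subst hxm
      rw [PySem.Dict.get?_insert_self]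
      by_cases hxt : x ∈ t
      · simp [hxt, pv_union_absorb]
      · simp [hxt]
    · rw [PySem.Dict.get?_insert_of_ne _ _ hxm]
      simp [hxm]

-- B's whole first pass: each key holds the fold of unions over the groups containing it.
theorem pv_bacc_get? (gs : List (List Int)) (d : PySem.Dict Int (PySem.Set Int)) (x : Int) :
    (gs.foldl (fun acc group =>
        group.foldl (fun (acc : PySem.Dict Int (PySem.Set Int)) m =>
          if acc.contains m then acc.insert m (PySem.Set.union (acc.getD m PySem.Set.empty) group)
          else acc.insert m (PySem.Set.ofList group)) acc) d).get? x
    = if pvHits x gs then some (pvSfold x gs ((d.get? x).getD PySem.Set.empty)) else d.get? x := by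
  induction gs generalizing d with
  | nil => simp [pvHits]
  | cons g t ih =>
    rw [List.foldl_cons, ih]
    by_cases hg : x ∈ g
    · rw [pv_mfold_get? g g d x, if_pos hg]
      have hh : pvHits x (g :: t) = true := by simp [pvHits, hg]
      have hs : pvSfold x (g :: t) ((d.get? x).getD PySem.Set.empty)
          = pvSfold x t (PySem.Set.union ((d.get? x).getD PySem.Set.empty) g) := by
        simp [pvSfold, hg]
      rw [hh, if_pos rfl, hs]
      by_cases ht : pvHits x t = true
      · rw [if_pos ht]; rfl
      · rw [Bool.not_eq_true] at ht
        rw [if_neg (by simp [ht]), pv_sfold_no_hits x t _ ht]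
    · rw [pv_mfold_get? g g d x, if_neg hg]
      have hh : pvHits x (g :: t) = pvHits x t := by simp [pvHits, hg]
      have hs : pvSfold x (g :: t) ((d.get? x).getD PySem.Set.empty)
          = pvSfold x t ((d.get? x).getD PySem.Set.empty) := by simp [pvSfold, hg]
      rw [hh, hs]

-- A's inner double loop for one index, once the key is present: unions accumulate on that key.
theorem pv_afold_insert (x : Int) (gs : List (List Int)) (d : PySem.Dict Int (PySem.Set Int))
    (s : PySem.Set Int) :
    gs.foldl (fun (d : PySem.Dict Int (PySem.Set Int)) g =>
        if x ∈ g then d.modify x PySem.Set.empty (fun s => PySem.Set.union s g) else d)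
      (d.insert x s)
    = d.insert x (pvSfold x gs s) := by
  induction gs generalizing s with
  | nil => rfl
  | cons g t ih =>
    by_cases hg : x ∈ g
    · have hstep : ((d.insert x s).modify x PySem.Set.empty (fun s => PySem.Set.union s g))
          = d.insert x (PySem.Set.union s g) := by
        show (d.insert x s).insert x (PySem.Set.union ((d.insert x s).getD x PySem.Set.empty) g)
            = d.insert x (PySem.Set.union s g)
        rw [PySem.Dict.getD_insert_self, PySem.Dict.insert_insert_self]
      have hs : pvSfold x (g :: t) s = pvSfold x t (PySem.Set.union s g) := by simp [pvSfold, hg]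
      rw [List.foldl_cons, if_pos hg, hstep, ih, hs]
    · have hs : pvSfold x (g :: t) s = pvSfold x t s := by simp [pvSfold, hg]
      rw [List.foldl_cons, if_neg hg, ih, hs]

-- A's inner double loop for one fresh index: appends that key iff some group contains it.
theorem pv_afold_fresh (x : Int) (gs : List (List Int)) (d : PySem.Dict Int (PySem.Set Int))
    (hfresh : d.contains x = false) :
    gs.foldl (fun (d : PySem.Dict Int (PySem.Set Int)) g =>
        if x ∈ g then d.modify x PySem.Set.empty (fun s => PySem.Set.union s g) else d) d
    = if pvHits x gs then d.insert x (pvSfold x gs PySem.Set.empty) else d := by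
  induction gs with
  | nil => simp [pvHits]
  | cons g t ih =>
    by_cases hg : x ∈ g
    · have hstep : (d.modify x PySem.Set.empty (fun s => PySem.Set.union s g))
          = d.insert x (PySem.Set.union PySem.Set.empty g) := by
        show d.insert x (PySem.Set.union (d.getD x PySem.Set.empty) g)
            = d.insert x (PySem.Set.union PySem.Set.empty g)
        rw [PySem.Dict.getD_of_not_contains _ _ hfresh]
      have hh : pvHits x (g :: t) = true := by simp [pvHits, hg]
      have hs : pvSfold x (g :: t) PySem.Set.empty
          = pvSfold x t (PySem.Set.union PySem.Set.empty g) := by simp [pvSfold, hg]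
      rw [List.foldl_cons, if_pos hg, hstep, pv_afold_insert, hh, if_pos rfl, hs]
    · have hh : pvHits x (g :: t) = pvHits x t := by simp [pvHits, hg]
      have hs : pvSfold x (g :: t) PySem.Set.empty = pvSfold x t PySem.Set.empty := by
        simp [pvSfold, hg]
      rw [List.foldl_cons, if_neg hg, ih, hh, hs]

theorem pv_not_mem_pvL_fst (n : Nat) (gs : List (List Int)) :
    ((n : Int)) ∉ (pvL n gs).map Prod.fst := by
  intro h
  simp only [pvL, List.mem_map, List.mem_filterMap, List.mem_range] at h
  obtain ⟨p, ⟨k, hk, hp⟩, hfst⟩ := h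
  split at hp
  · cases hp
    simp only [] at hfst
    have : (k : Int) = (n : Int) := hfst
    omega
  · cases hp

theorem pv_contains_of_items (n : Nat) (gs : List (List Int)) (d : PySem.Dict Int (PySem.Set Int))
    (h : d.items = pvL n gs) : d.contains ((n : Nat) : Int) = false := by
  rw [PySem.Dict.contains_eq_decide_mem_keys]
  have hk : d.keys = (pvL n gs).map Prod.fst := by
    simp only [PySem.Dict.keys, h]
  rw [hk]
  simp [pv_not_mem_pvL_fst n gs]

theorem pv_pvL_succ (n : Nat) (gs : List (List Int)) :
    pvL (n + 1) gs = pvL n gs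
      ++ (if pvHits (n : Int) gs then [((n : Int), pvSfold (n : Int) gs PySem.Set.empty)] else []) := by
  rw [pvL, List.range_succ, List.filterMap_append]
  congr 1
  by_cases h : pvHits (n : Int) gs = true
  · simp [h]
  · rw [Bool.not_eq_true] at h; simp [h]

-- A's whole computation produces the items list pvL (length pp) gs.
theorem pv_a_items (gs : List (List Int)) (pp : List Int) :
    ((PySem.List.enumerate pp 0).foldl (fun d ic =>
        gs.foldl (fun (d : PySem.Dict Int (PySem.Set Int)) g =>
          if ic.1 ∈ g then d.modify ic.1 PySem.Set.empty (fun s => PySem.Set.union s g) else d) d)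
      PySem.Dict.empty).items = pvL pp.length gs := by
  induction pp using List.reverseRecOn with
  | nil => rfl
  | append_singleton pp x ih =>
    rw [PySem.List.enumerate_append, List.foldl_append]
    have hone : PySem.List.enumerate [x] (0 + (pp.length : Int)) = [((pp.length : Int), x)] := by
      simp [PySem.List.enumerate_cons, PySem.List.enumerate_nil]
    rw [hone, List.foldl_cons, List.foldl_nil]
    set A := (PySem.List.enumerate pp 0).foldl (fun d ic =>
        gs.foldl (fun (d : PySem.Dict Int (PySem.Set Int)) g =>
          if ic.1 ∈ g then d.modify ic.1 PySem.Set.empty (fun s => PySem.Set.union s g) else d) d)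
      PySem.Dict.empty with hA
    have hfresh : A.contains ((pp.length : Nat) : Int) = false :=
      pv_contains_of_items pp.length gs A ih
    simp only []
    rw [pv_afold_fresh _ _ _ hfresh]
    rw [List.length_append, List.length_cons, List.length_nil, pv_pvL_succ]
    by_cases h : pvHits ((pp.length : Nat) : Int) gs = true
    · rw [if_pos h, if_pos h,
        PySem.Dict.items_insert_of_not_contains _ _ hfresh, ih]
    · rw [Bool.not_eq_true] at h
      rw [if_neg (by simp [h]), if_neg (by simp [h]), ih, List.append_nil]

-- B's emission loop produces the same items list.
theorem pv_b_items (gs : List (List Int)) (acc : PySem.Dict Int (PySem.Set Int))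
    (hacc : ∀ x : Int, acc.get? x
      = if pvHits x gs then some (pvSfold x gs PySem.Set.empty) else none) (n : Nat) :
    ((PySem.List.pyRange 0 (n : Int) 1).foldl
        (fun (out : PySem.Dict Int (PySem.Set Int)) i =>
          match acc.get? i with
          | some s => out.insert i s
          | none => out) PySem.Dict.empty).items = pvL n gs := by
  induction n with
  | zero => rfl
  | succ n ih =>
    have hr : PySem.List.pyRange 0 ((n + 1 : Nat) : Int) 1
        = PySem.List.pyRange 0 (n : Int) 1 ++ [(n : Int)] := by
      rw [show ((n + 1 : Nat) : Int) = (n : Int) + 1 by push_cast; ring]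
      exact PySem.List.pyRange_one_succ_right (by omega)
    rw [hr, List.foldl_append, List.foldl_cons, List.foldl_nil]
    set B := (PySem.List.pyRange 0 (n : Int) 1).foldl
        (fun (out : PySem.Dict Int (PySem.Set Int)) i =>
          match acc.get? i with
          | some s => out.insert i s
          | none => out) PySem.Dict.empty with hB
    have hfresh : B.contains ((n : Nat) : Int) = false := pv_contains_of_items n gs B ih
    rw [pv_pvL_succ, hacc]
    by_cases h : pvHits ((n : Nat) : Int) gs = true
    · rw [if_pos h, if_pos h]
      show (B.insert (n : Int) (pvSfold (n : Int) gs PySem.Set.empty)).items = _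
      rw [PySem.Dict.items_insert_of_not_contains _ _ hfresh, ih]
    · rw [Bool.not_eq_true] at h
      rw [if_neg (by simp [h]), if_neg (by simp [h])]
      show B.items = pvL n gs ++ []
      rw [ih, List.append_nil]

-- ===== VERDICT (by name: the statement is the Claim_ definition above) =====
theorem get_neighbors_dictionary_spec : Claim_equal_get_neighbors_dictionary := by
  intro pp cs _
  unfold Spec_get_neighbors_dictionary get_neighbors_dictionary get_neighbors_dictionary_alt
  simp only []
  have hnest : ∀ d : PySem.Dict Int (PySem.Set Int), ∀ x : Int,
      cs.foldl (fun d constraint_set =>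
        constraint_set.foldl (fun (d : PySem.Dict Int (PySem.Set Int)) g =>
          if x ∈ g then d.modify x PySem.Set.empty (fun s => PySem.Set.union s g) else d) d) d
      = (cs.flatMap id).foldl (fun (d : PySem.Dict Int (PySem.Set Int)) g =>
          if x ∈ g then d.modify x PySem.Set.empty (fun s => PySem.Set.union s g) else d) d :=
    fun d x => pv_foldl_nest _ cs d
  have hA : ((PySem.List.enumerate pp 0).foldl (fun d ic =>
      cs.foldl (fun d constraint_set =>
        constraint_set.foldl (fun (d : PySem.Dict Int (PySem.Set Int)) g =>
          if ic.1 ∈ g then d.modify ic.1 PySem.Set.empty (fun s => PySem.Set.union s g) else d) d) d)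
    PySem.Dict.empty).items = pvL pp.length (cs.flatMap id) := by
    rw [show (fun (d : PySem.Dict Int (PySem.Set Int)) (ic : Int × Int) =>
        cs.foldl (fun d constraint_set =>
          constraint_set.foldl (fun (d : PySem.Dict Int (PySem.Set Int)) g =>
            if ic.1 ∈ g then d.modify ic.1 PySem.Set.empty (fun s => PySem.Set.union s g) else d) d) d)
      = (fun (d : PySem.Dict Int (PySem.Set Int)) (ic : Int × Int) =>
        (cs.flatMap id).foldl (fun (d : PySem.Dict Int (PySem.Set Int)) g =>
          if ic.1 ∈ g then d.modify ic.1 PySem.Set.empty (fun s => PySem.Set.union s g) else d) d)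
      from funext fun d => funext fun ic => hnest d ic.1]
    exact pv_a_items (cs.flatMap id) pp
  have hacc : ∀ x : Int,
      (cs.foldl (fun acc constraint_set =>
        constraint_set.foldl (fun acc group =>
          group.foldl (fun (acc : PySem.Dict Int (PySem.Set Int)) m =>
            if acc.contains m then acc.insert m (PySem.Set.union (acc.getD m PySem.Set.empty) group)
            else acc.insert m (PySem.Set.ofList group)) acc) acc) PySem.Dict.empty).get? x
      = if pvHits x (cs.flatMap id) then some (pvSfold x (cs.flatMap id) PySem.Set.empty)
        else none := by
    intro x
    rw [pv_foldl_nest (fun acc group => group.foldl (fun (acc : PySem.Dict Int (PySem.Set Int)) m =>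
        if acc.contains m then acc.insert m (PySem.Set.union (acc.getD m PySem.Set.empty) group)
        else acc.insert m (PySem.Set.ofList group)) acc) cs PySem.Dict.empty]
    rw [pv_bacc_get? (cs.flatMap id) PySem.Dict.empty x]
    by_cases h : pvHits x (cs.flatMap id) = true
    · rw [if_pos h, if_pos h]; rfl
    · rw [Bool.not_eq_true] at h
      rw [if_neg (by rw [h]; simp), if_neg (by rw [h]; simp)]; rfl
  rw [hA, pv_b_items (cs.flatMap id) _ hacc pp.length]
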